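-- pv_equiv track=rewrite | github.com/zjohnsilver/college-codes | ProgramasPython/Trabalhando com Imagem/python_work_imagem.py | direita90
-- ===== SOURCE A (Python) =====
-- def direita90(lista, linhas, colunas):
--     k = 0
--     matriz = []
--     for i in range(linhas):
--         matriz.append([])
--     for i in range(linhas):
--         for j in range(colunas):
--             matriz[i].append(0)
--
--     for j in range(colunas-1, -1, -1):
--         for i in range(linhas):
--             matriz[i][j] = lista[k]
--             k += 1
--     return matriz
-- ===== SOURCE B (Python) =====
-- def direita90(lista, linhas, colunas):
--     it = iter(lista)
--     rows = [[] for _ in range(linhas)]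
--     for _ in range(colunas):
--         for row in rows:
--             row.append(next(it))
--     return [list(reversed(row)) for row in rows]
-- ===== Notes on version B (the rewrite author's own statement) =====
-- stated objective: alternative
-- what changed: B streams the flat list once through an iterator, appending each consumed value to the next row in turn (building each row back-to-front), and reverses every row at the end - no index arithmetic, no zero-initialized matrix and no reversed column loop with a counter.
import Mathlib
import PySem

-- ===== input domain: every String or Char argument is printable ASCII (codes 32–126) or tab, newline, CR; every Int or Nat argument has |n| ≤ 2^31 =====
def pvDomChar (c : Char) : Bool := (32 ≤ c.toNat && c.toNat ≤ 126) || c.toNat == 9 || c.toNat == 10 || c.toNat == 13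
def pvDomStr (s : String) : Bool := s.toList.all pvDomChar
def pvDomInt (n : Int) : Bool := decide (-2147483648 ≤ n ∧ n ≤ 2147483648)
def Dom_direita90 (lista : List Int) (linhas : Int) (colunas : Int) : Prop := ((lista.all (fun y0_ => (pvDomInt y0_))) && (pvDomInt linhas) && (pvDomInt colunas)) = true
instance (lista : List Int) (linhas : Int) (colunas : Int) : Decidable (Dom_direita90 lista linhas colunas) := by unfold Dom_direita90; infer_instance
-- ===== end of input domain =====

-- B streams the flat list once through an iterator, appending each value to the next row in
-- turn (rows grow back-to-front) and reversing each row at the end; no index arithmetic,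
-- no zero-filled matrix, no reversed column loop (objective: alternative decomposition).

-- ===== PORT A =====
-- Literal port of A: build `linhas` empty rows, append `colunas` zeros to each row,
-- then for j = colunas-1 .. 0 and i = 0 .. linhas-1 set matriz[i][j] := lista[k], k += 1.
-- pyGetD/pySetD (total forms) stand for list indexing/assignment; the out-of-range read
-- lista[k] (IndexError in Python) is excluded by Pre_direita90.
def direita90 (lista : List Int) (linhas : Int) (colunas : Int) : List (List Int) :=
  let matriz : List (List Int) :=
    (PySem.List.pyRange 0 linhas 1).foldl (fun m _ => m ++ [([] : List Int)]) []
  let matriz :=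
    (PySem.List.pyRange 0 linhas 1).foldl (fun m i =>
      (PySem.List.pyRange 0 colunas 1).foldl
        (fun m' _ => PySem.List.pySetD m' i (PySem.List.pyGetD m' i [] ++ [(0 : Int)])) m) matriz
  let st :=
    (PySem.List.pyRange (colunas - 1) (-1) (-1)).foldl (fun st j =>
      (PySem.List.pyRange 0 linhas 1).foldl (fun st i =>
        (PySem.List.pySetD st.1 i
            (PySem.List.pySetD (PySem.List.pyGetD st.1 i []) j (PySem.List.pyGetD lista st.2 0)),
         st.2 + 1)) st) (matriz, (0 : Int))
  st.1

-- ===== PORT B =====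
-- Literal port of B: the Python iterator over `lista` is the second state component
-- (the not-yet-consumed suffix); `next(it)` reads its head and drops it — `headD 0` is the
-- total stand-in for the StopIteration case, which Pre_direita90 excludes.
-- State: (rows built so far each back-to-front, remaining input); finally reverse each row.
def direita90_alt (lista : List Int) (linhas : Int) (colunas : Int) : List (List Int) :=
  let rows : List (List Int) := (PySem.List.pyRange 0 linhas 1).map (fun _ => ([] : List Int))
  let st :=
    (PySem.List.pyRange 0 colunas 1).foldl
      (fun st _ =>
        st.1.foldl (fun acc row => (acc.1 ++ [row ++ [acc.2.headD 0]], acc.2.tail))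
          (([] : List (List Int)), st.2))
      (rows, lista)
  st.1.map (fun row => row.reverse)

-- ===== PRECONDITION & SPEC =====
-- Pre_ excludes exactly the inputs where A raises IndexError: a positive matrix shape
-- needing more elements than `lista` has.
def Pre_direita90 (lista : List Int) (linhas : Int) (colunas : Int) : Prop :=
  0 < linhas → 0 < colunas → linhas * colunas ≤ (lista.length : Int)
instance (lista : List Int) (linhas : Int) (colunas : Int) : Decidable (Pre_direita90 lista linhas colunas) := by
  unfold Pre_direita90; infer_instance

def pvWitness_direita90 : List Int × Int × Int := ([1, 2, 3, 4, 5, 6], 2, 3)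

def Spec_direita90 (lista : List Int) (linhas : Int) (colunas : Int) (out : List (List Int)) : Prop := out = direita90_alt lista linhas colunas
instance (lista : List Int) (linhas : Int) (colunas : Int) (out : List (List Int)) : Decidable (Spec_direita90 lista linhas colunas out) := by unfold Spec_direita90; infer_instance

-- ===== CLAIM (what is proved, stated in full; the proofs are below) =====
def Claim_equal_direita90 : Prop := ∀ (lista : List Int) (linhas : Int) (colunas : Int), Dom_direita90 lista linhas colunas → Pre_direita90 lista linhas colunas → Spec_direita90 lista linhas colunas (direita90 lista linhas colunas)

-- ===== LEMMAS AND PROOFS =====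

/-- Map with an explicit running index (proof-side helper). -/
def mapIdxFrom (f : Nat → List Int → List Int) : List (List Int) → Nat → List (List Int)
  | [], _ => []
  | r :: rs, s => f s r :: mapIdxFrom f rs (s + 1)

theorem length_mapIdxFrom (f : Nat → List Int → List Int) (l : List (List Int)) (s : Nat) :
    (mapIdxFrom f l s).length = l.length := by
  induction l generalizing s with
  | nil => rfl
  | cons r rs ih => simp [mapIdxFrom, ih]

theorem mem_mapIdxFrom {f : Nat → List Int → List Int} {l : List (List Int)} {s : Nat}
    {x : List Int} (hx : x ∈ mapIdxFrom f l s) : ∃ i r, r ∈ l ∧ x = f i r := by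
  induction l generalizing s with
  | nil => simp [mapIdxFrom] at hx
  | cons r rs ih =>
    simp only [mapIdxFrom, List.mem_cons] at hx
    rcases hx with h | h
    · exact ⟨s, r, by simp, h⟩
    · rcases ih h with ⟨i, r', hr', hx'⟩
      exact ⟨i, r', by simp [hr'], hx'⟩

theorem mapIdxFrom_congr {f g : Nat → List Int → List Int} {l : List (List Int)} (s : Nat)
    (h : ∀ i r, r ∈ l → f i r = g i r) : mapIdxFrom f l s = mapIdxFrom g l s := by
  induction l generalizing s with
  | nil => rfl
  | cons r rs ih =>
    simp only [mapIdxFrom]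
    exact congrArg₂ _ (h s r (by simp)) (ih _ fun i r' hr' => h i r' (by simp [hr']))

theorem mapIdxFrom_shift (f : Nat → List Int → List Int) (l : List (List Int)) (s : Nat) :
    mapIdxFrom f l (s + 1) = mapIdxFrom (fun a r => f (a + 1) r) l s := by
  induction l generalizing s with
  | nil => rfl
  | cons r rs ih => simp [mapIdxFrom, ih]

theorem mapIdxFrom_comp (f g : Nat → List Int → List Int) (l : List (List Int)) (s : Nat) :
    mapIdxFrom f (mapIdxFrom g l s) s = mapIdxFrom (fun i r => f i (g i r)) l s := by
  induction l generalizing s with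
  | nil => rfl
  | cons r rs ih => simp [mapIdxFrom, ih]

theorem mapIdxFrom_id (l : List (List Int)) (s : Nat) :
    mapIdxFrom (fun _ r => r) l s = l := by
  induction l generalizing s with
  | nil => rfl
  | cons r rs ih => simp [mapIdxFrom, ih]

theorem mapIdxFrom_replicate (f : Nat → List Int → List Int) (m : Nat) (x : List Int) (s : Nat) :
    mapIdxFrom f (List.replicate m x) s = (List.range m).map (fun a => f (s + a) x) := by
  induction m generalizing s with
  | zero => rfl
  | succ m ih =>
    rw [List.replicate_succ, List.range_succ_eq_map]
    simp only [mapIdxFrom, ih, List.map_cons, List.map_map]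
    refine congrArg₂ _ (by simp) (List.map_congr_left fun a _ => ?_)
    simp only [Function.comp]
    rw [show s + 1 + a = s + (a + 1) by omega]

/-- mapIdxFrom over a range-comprehension is a range-comprehension. -/
theorem mapIdxFrom_map_range (f : Nat → List Int → List Int) (m : Nat) :
    ∀ (g : Nat → List Int) (s : Nat),
    mapIdxFrom f ((List.range m).map g) s = (List.range m).map (fun a => f (s + a) (g a)) := by
  induction m with
  | zero => intro g s; rfl
  | succ m ih =>
    intro g s
    rw [List.range_succ_eq_map]
    simp only [List.map_cons, List.map_map, mapIdxFrom]
    refine congrArg₂ _ (by simp) ?_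
    rw [show (g ∘ fun a => a + 1) = (fun a => g (a + 1)) from rfl, ih]
    refine (List.map_congr_left fun a _ => ?_).symm
    simp only [Function.comp]
    rw [show s + (a + 1) = s + 1 + a by omega]

theorem foldl_const {α β : Type} (l : List α) (s : β) :
    l.foldl (fun s _ => s) s = s := by
  induction l generalizing s with
  | nil => rfl
  | cons a t ih => simp only [List.foldl_cons]; exact ih s

/-- foldl whose body fixes the state keeps it. -/
theorem foldl_fixed {α β : Type} (g : β → α → β) (l : List α) (s : β) (h : ∀ a, g s a = s) :
    l.foldl g s = s := by
  induction l with
  | nil => rfl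
  | cons a t ih => rw [List.foldl_cons, h a]; exact ih

theorem foldl_append_singleton {α : Type} (l : List α) (acc : List (List Int)) :
    l.foldl (fun m _ => m ++ [([] : List Int)]) acc = acc ++ List.replicate l.length [] := by
  induction l generalizing acc with
  | nil => simp
  | cons a t ih => simp [ih, List.replicate_succ, List.append_assoc]

theorem map_const_replicate {α : Type} (l : List α) (c : List Int) :
    l.map (fun _ => c) = List.replicate l.length c := by
  induction l with
  | nil => rfl
  | cons a t ih => simp [ih, List.replicate_succ]

theorem aux_getD {α : Type} (pre : List α) (r : α) (rest : List α) (d : α) :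
    (pre ++ r :: rest).getD pre.length d = r := by
  induction pre with
  | nil => rfl
  | cons a pre ih => simp only [List.cons_append, List.length_cons, List.getD_cons_succ]; exact ih

theorem aux_set {α : Type} (pre : List α) (r : α) (rest : List α) (v : α) :
    (pre ++ r :: rest).set pre.length v = pre ++ v :: rest := by
  induction pre with
  | nil => rfl
  | cons a pre ih => simp [ih]

theorem aux_drop_set (r : List Int) (t : Nat) (v : Int) (h : t < r.length) :
    (r.set t v).drop t = v :: r.drop (t + 1) := by
  induction t generalizing r with
  | zero => cases r with
    | nil => simp at h
    | cons x xs => simp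
  | succ t ih => cases r with
    | nil => simp at h
    | cons x xs =>
      simp only [List.set, List.drop_succ_cons]
      exact ih xs (by simpa using h)

theorem getD_drop (l : List Int) (k : Nat) : ∀ (i : Nat) (d : Int),
    (l.drop k).getD i d = l.getD (k + i) d := by
  induction k generalizing l with
  | zero => intro i d; simp
  | succ k ih =>
    intro i d
    cases l with
    | nil => simp
    | cons x xs =>
      simp only [List.drop_succ_cons, ih xs i d]
      rw [show k + 1 + i = (k + i) + 1 by omega]
      rfl

theorem headD_eq_getD (l : List Int) (d : Int) : l.headD d = l.getD 0 d := by
  cases l <;> rfl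

/-- One pass of the zero-appending inner loop of A's second stage: append `cs.length`
zeros to the row at position `pre.length`. -/
theorem inner_zeros (cs : List Int) : ∀ (r : List Int) (pre rest : List (List Int)),
    cs.foldl (fun m' _ => PySem.List.pySetD m' (pre.length : Int)
        (PySem.List.pyGetD m' (pre.length : Int) [] ++ [(0 : Int)])) (pre ++ r :: rest)
    = pre ++ (r ++ List.replicate cs.length 0) :: rest := by
  induction cs with
  | nil => intro r pre rest; simp
  | cons c cs ih =>
    intro r pre rest
    simp only [List.foldl_cons, PySem.List.pySetD_natCast, PySem.List.pyGetD_natCast,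
      aux_getD, aux_set]
    have ih' := ih (r ++ [0]) pre rest
    simp only [PySem.List.pySetD_natCast, PySem.List.pyGetD_natCast] at ih'
    rw [ih']
    simp [List.replicate_succ, List.append_assoc]

/-- A's second stage (rows loop of zero-appends), in pre ++ rest form. -/
theorem rows_zeros (cs : List Int) : ∀ (rest pre : List (List Int)),
    (PySem.List.pyRange (pre.length : Int) (((pre ++ rest).length : Nat) : Int) 1).foldl
      (fun m i => cs.foldl
        (fun m' _ => PySem.List.pySetD m' i (PySem.List.pyGetD m' i [] ++ [(0 : Int)])) m)
      (pre ++ rest)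
    = pre ++ rest.map (fun r => r ++ List.replicate cs.length 0) := by
  intro rest
  induction rest with
  | nil =>
    intro pre
    rw [PySem.List.pyRange_one_eq_nil (by simp)]
    simp
  | cons r rs ih =>
    intro pre
    rw [PySem.List.pyRange_one_cons (by push_cast [List.length_append, List.length_cons]; omega)]
    simp only [List.foldl_cons]
    rw [inner_zeros cs r pre rs]
    have h0 : pre ++ (r ++ List.replicate cs.length 0) :: rs
        = (pre ++ [r ++ List.replicate cs.length 0]) ++ rs := by simp
    have h1 : ((pre.length : Int) + 1)
        = (((pre ++ [r ++ List.replicate cs.length 0]).length : Nat) : Int) := by simp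
    have h2 : (((pre ++ r :: rs).length : Nat) : Int)
        = ((((pre ++ [r ++ List.replicate cs.length 0]) ++ rs).length : Nat) : Int) := by simp
    rw [h0, h1, h2, ih (pre ++ [r ++ List.replicate cs.length 0])]
    simp

/-- One column pass of A's fill loop (the inner rows loop), in pre ++ rest form. -/
theorem fill_rows (lista : List Int) (j : Int) : ∀ (rest pre : List (List Int)) (k : Int),
    (PySem.List.pyRange (pre.length : Int) (((pre ++ rest).length : Nat) : Int) 1).foldl
      (fun st i =>
        (PySem.List.pySetD st.1 i
            (PySem.List.pySetD (PySem.List.pyGetD st.1 i []) j (PySem.List.pyGetD lista st.2 0)),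
         st.2 + 1))
      (pre ++ rest, k)
    = (pre ++ mapIdxFrom
        (fun a r => PySem.List.pySetD r j (PySem.List.pyGetD lista (k + (a : Int)) 0)) rest 0,
       k + (rest.length : Int)) := by
  intro rest
  induction rest with
  | nil =>
    intro pre k
    rw [PySem.List.pyRange_one_eq_nil (by simp)]
    simp [mapIdxFrom]
  | cons r rs ih =>
    intro pre k
    rw [PySem.List.pyRange_one_cons (by push_cast [List.length_append, List.length_cons]; omega)]
    simp only [List.foldl_cons, PySem.List.pySetD_natCast, PySem.List.pyGetD_natCast,
      aux_getD, aux_set]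
    have h0 : pre ++ PySem.List.pySetD r j (PySem.List.pyGetD lista k 0) :: rs
        = (pre ++ [PySem.List.pySetD r j (PySem.List.pyGetD lista k 0)]) ++ rs := by simp
    have h1 : ((pre.length : Int) + 1)
        = (((pre ++ [PySem.List.pySetD r j (PySem.List.pyGetD lista k 0)]).length : Nat) : Int) := by
      simp
    have h2 : (((pre ++ r :: rs).length : Nat) : Int)
        = ((((pre ++ [PySem.List.pySetD r j (PySem.List.pyGetD lista k 0)]) ++ rs).length : Nat) : Int) := by
      simp
    rw [h0, h1, h2, ih (pre ++ [PySem.List.pySetD r j (PySem.List.pyGetD lista k 0)]) (k + 1)]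
    simp only [Prod.mk.injEq]
    refine ⟨?_, by simp only [List.length_cons]; push_cast; ring⟩
    simp only [mapIdxFrom, Int.natCast_zero, add_zero, List.append_assoc, List.singleton_append]
    refine congrArg _ (congrArg _ ?_)
    rw [mapIdxFrom_shift]
    refine mapIdxFrom_congr 0 fun a r'' _ => ?_
    rw [show k + 1 + (a : Int) = k + (((a + 1 : Nat) : Int)) by push_cast; ring]

/-- A's third stage (columns t-1 .. 0 filled from `lista`), characterised row-wise. -/
theorem cols_fill (lista : List Int) (n : Nat) : ∀ (t : Nat) (M : List (List Int)) (k : Int),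
    M.length = n → (∀ r ∈ M, t ≤ r.length) →
    ((PySem.List.pyRange ((t : Int) - 1) (-1) (-1)).foldl
      (fun st j => (PySem.List.pyRange 0 (n : Nat) 1).foldl
        (fun st i =>
          (PySem.List.pySetD st.1 i
              (PySem.List.pySetD (PySem.List.pyGetD st.1 i []) j (PySem.List.pyGetD lista st.2 0)),
           st.2 + 1)) st)
      (M, k)).1
    = mapIdxFrom (fun i r =>
        (List.range t).map
          (fun jn : Nat => PySem.List.pyGetD lista (k + ((t : Int) - 1 - (jn : Int)) * (n : Int) + (i : Int)) 0)
        ++ r.drop t) M 0 := by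
  intro t
  induction t with
  | zero =>
    intro M k hlen _hrows
    rw [show ((0 : Nat) : Int) - 1 = -1 by norm_num, PySem.List.pyRange_neg_one_eq_nil le_rfl]
    simp only [List.foldl_nil, List.range_zero, List.map_nil, List.nil_append, List.drop_zero]
    exact (mapIdxFrom_id M 0).symm
  | succ t ih =>
    intro M k hlen hrows
    have hcast : (((t + 1 : Nat)) : Int) - 1 = (t : Int) := by push_cast; ring
    rw [hcast, PySem.List.pyRange_neg_one_cons (by omega)]
    simp only [List.foldl_cons]
    have hfr := fill_rows lista (t : Int) M [] k
    simp only [List.nil_append, List.length_nil, Int.natCast_zero] at hfr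
    rw [hlen] at hfr
    rw [hfr]
    set g : Nat → List Int → List Int :=
      fun a r => PySem.List.pySetD r (t : Int) (PySem.List.pyGetD lista (k + (a : Int)) 0) with hg
    have hlen1 : (mapIdxFrom g M 0).length = n := by rw [length_mapIdxFrom, hlen]
    have hrows1 : ∀ r ∈ mapIdxFrom g M 0, t ≤ r.length := by
      intro r hr'
      rcases mem_mapIdxFrom hr' with ⟨i, r', hr'', rfl⟩
      have := hrows r' hr''
      simp only [hg, PySem.List.length_pySetD]
      omega
    rw [ih (mapIdxFrom g M 0) (k + (n : Int)) hlen1 hrows1]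
    rw [mapIdxFrom_comp]
    refine mapIdxFrom_congr 0 fun i r hrmem => ?_
    have hrl : t < r.length := by have := hrows r hrmem; omega
    have hdrop : (g i r).drop t
        = PySem.List.pyGetD lista (k + (i : Int)) 0 :: r.drop (t + 1) := by
      simp only [hg, PySem.List.pySetD_natCast]
      exact aux_drop_set r t _ hrl
    rw [hdrop, List.range_succ, List.map_append, List.append_assoc]
    refine congrArg₂ _ (List.map_congr_left fun jn _ => ?_) ?_
    · congr 1
      ring
    · simp only [List.map_cons, List.map_nil, List.singleton_append]
      congr 2
      ring

/-- One pass of B's inner loop: each row receives the next element of `rest` in order. -/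
theorem inner_pass : ∀ (rows : List (List Int)) (rest : List Int) (done : List (List Int)),
    rows.foldl (fun acc row => (acc.1 ++ [row ++ [acc.2.headD 0]], acc.2.tail)) (done, rest)
    = (done ++ mapIdxFrom (fun i row => row ++ [rest.getD i 0]) rows 0, rest.drop rows.length) := by
  intro rows
  induction rows with
  | nil => intro rest done; simp [mapIdxFrom]
  | cons r rs ih =>
    intro rest done
    simp only [List.foldl_cons]
    rw [ih rest.tail (done ++ [r ++ [rest.headD 0]])]
    simp only [mapIdxFrom, Prod.mk.injEq]
    refine ⟨?_, ?_⟩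
    · rw [headD_eq_getD, mapIdxFrom_shift, List.append_assoc, List.singleton_append]
      refine congrArg _ (congrArg _ ?_)
      refine mapIdxFrom_congr 0 fun a row _ => ?_
      rw [← List.drop_one, getD_drop, Nat.add_comm 1 a]
    · rw [← List.drop_one, List.drop_drop, List.length_cons]
      rw [show rs.length + 1 = 1 + rs.length by omega]

/-- B's outer loop: after `t` passes starting from `n` empty rows, row `i` holds the
elements `lista[0*n+i], …, lista[(t-1)*n+i]` and `t*n` elements are consumed. -/
theorem B_passes (lista : List Int) (n : Nat) : ∀ (t : Nat),
    (PySem.List.pyRange 0 (t : Int) 1).foldl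
      (fun st (_ : Int) =>
        st.1.foldl (fun acc row => (acc.1 ++ [row ++ [acc.2.headD 0]], acc.2.tail))
          (([] : List (List Int)), st.2))
      ((List.range n).map (fun _ => ([] : List Int)), lista)
    = ((List.range n).map (fun i => (List.range t).map (fun s => lista.getD (s * n + i) 0)),
       lista.drop (t * n)) := by
  intro t
  induction t with
  | zero =>
    rw [PySem.List.pyRange_one_eq_nil (by norm_num)]
    simp
  | succ t ih =>
    rw [show ((t + 1 : Nat) : Int) = (t : Int) + 1 by push_cast; ring,
      PySem.List.pyRange_one_succ_right (by positivity), List.foldl_append, ih]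
    simp only [List.foldl_cons, List.foldl_nil]
    rw [inner_pass, mapIdxFrom_map_range, List.nil_append, List.length_map, List.length_range,
      List.drop_drop]
    refine congrArg₂ _ (List.map_congr_left fun i _ => ?_) ?_
    · rw [List.range_succ, List.map_append]
      simp only [zero_add, List.map_cons, List.map_nil]
      refine congrArg _ (congrArg (fun x => [x]) ?_)
      rw [getD_drop]
    · congr 1; ring

/-- Reversing a range-comprehension flips the index. -/
theorem reverse_map_range (g : Nat → Int) : ∀ (c : Nat),
    ((List.range c).map g).reverse = (List.range c).map (fun j => g (c - 1 - j)) := by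
  intro c
  induction c with
  | zero => rfl
  | succ c ih =>
    calc ((List.range (c + 1)).map g).reverse
        = g c :: ((List.range c).map g).reverse := by rw [List.range_succ]; simp
      _ = g c :: (List.range c).map (fun j => g (c - 1 - j)) := by rw [ih]
      _ = (List.range (c + 1)).map (fun j => g (c + 1 - 1 - j)) := by
          rw [List.range_succ_eq_map]
          simp only [List.map_cons, List.map_map]
          refine congrArg₂ _ (by norm_num) ((List.map_congr_left fun j _ => ?_).symm)
          simp only [Function.comp]
          congr 1
          omega

-- ===== VERDICT (by name: the statement is the Claim_ definition above) =====
theorem direita90_spec : Claim_equal_direita90 := by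
  intro lista linhas colunas _hdom _hpre
  unfold Spec_direita90
  by_cases hl : linhas ≤ 0
  · -- no rows: both sides are []
    simp only [direita90, direita90_alt]
    rw [PySem.List.pyRange_one_eq_nil (by omega)]
    simp only [List.foldl_nil, List.map_nil]
    rw [foldl_fixed _ _ _ (fun _ => rfl), foldl_fixed _ _ _ (fun _ => rfl)]
    simp
  · push Not at hl
    obtain ⟨n, hn⟩ : ∃ n : Nat, linhas = (n : Int) := ⟨linhas.toNat, (Int.toNat_of_nonneg (by omega)).symm⟩
    subst hn
    by_cases hc : colunas ≤ 0
    · -- no columns: both sides are n empty rows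
      simp only [direita90, direita90_alt]
      rw [PySem.List.pyRange_one_eq_nil (a := 0) (b := colunas) (by omega)]
      rw [PySem.List.pyRange_neg_one_eq_nil (by omega)]
      simp only [List.foldl_nil, foldl_const]
      rw [foldl_append_singleton, map_const_replicate]
      simp [List.map_replicate]
    · push Not at hc
      obtain ⟨c, hcn⟩ : ∃ cn : Nat, colunas = (cn : Int) := ⟨colunas.toNat, (Int.toNat_of_nonneg (by omega)).symm⟩
      subst hcn
      simp only [direita90, direita90_alt]
      -- A side
      rw [foldl_append_singleton]
      have hlen0 : (PySem.List.pyRange 0 ((n : Nat) : Int) 1).length = n := by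
        rw [PySem.List.length_pyRange_one]; simp
      rw [hlen0, List.nil_append]
      have hz := rows_zeros (PySem.List.pyRange 0 ((c : Nat) : Int) 1) (List.replicate n ([] : List Int)) []
      have hlenc : (PySem.List.pyRange 0 ((c : Nat) : Int) 1).length = c := by
        rw [PySem.List.length_pyRange_one]; simp
      simp only [List.nil_append, List.length_nil, Int.natCast_zero, List.length_replicate,
        List.map_replicate, hlenc] at hz
      rw [hz]
      rw [cols_fill lista n c (List.replicate n (List.replicate c (0 : Int))) 0
        (by simp) (by intro r hr; simp_all)]
      rw [mapIdxFrom_replicate]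
      -- B side
      have hrw : (PySem.List.pyRange 0 ((n : Nat) : Int) 1).map (fun _ => ([] : List Int))
          = (List.range n).map (fun _ => ([] : List Int)) := by
        rw [map_const_replicate, map_const_replicate, hlen0, List.length_range]
      rw [hrw, B_passes lista n c, List.map_map]
      -- both sides as range comprehensions; compare entrywise
      have hdc : List.drop c (List.replicate c (0 : Int)) = [] := by simp
      simp only [zero_add, hdc, List.append_nil]
      refine List.map_congr_left fun i _ => ?_
      simp only [Function.comp]
      rw [reverse_map_range]
      refine List.map_congr_left fun j hj => ?_
      have hjc : j < c := List.mem_range.mp hj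
      have hidx : ((c : Int) - 1 - (j : Int)) * (n : Int) + (i : Int)
          = (((c - 1 - j) * n + i : Nat) : Int) := by
        have h1 : ((c - 1 - j : Nat) : Int) = (c : Int) - 1 - (j : Int) := by omega
        push_cast
        rw [h1]
      rw [hidx, PySem.List.pyGetD_natCast]
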